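-- pv_equiv track=rewrite | github.com/Miguelp1411/prediction_deliverance | proyectos_hibridos/hybrid_schedule_project.1.1/scripts/train.py | _selector_subset
-- ===== SOURCE A (Python) =====
-- from collections import defaultdict
--
-- def _selector_subset(indices: list[tuple[str, str, int]], max_weeks_per_series: int) -> list[tuple[str, str, int]]:
--     grouped: dict[tuple[str, str], list[tuple[str, str, int]]] = defaultdict(list)
--     for row in indices:
--         grouped[(row[0], row[1])].append(row)
--     subset: list[tuple[str, str, int]] = []
--     for rows in grouped.values():
--         rows = sorted(rows, key=lambda x: x[2])
--         subset.extend(rows[-max_weeks_per_series:])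
--     subset.sort(key=lambda x: (x[0], x[1], x[2]))
--     return subset
-- ===== SOURCE B (Python) =====
-- def _selector_subset(indices: list[tuple[str, str, int]], max_weeks_per_series: int) -> list[tuple[str, str, int]]:
--     ordered = sorted(indices, key=lambda x: (x[0], x[1], x[2]))
--     subset: list[tuple[str, str, int]] = []
--     i, n = 0, len(ordered)
--     while i < n:
--         j = i + 1
--         while j < n and (ordered[j][0], ordered[j][1]) == (ordered[i][0], ordered[i][1]):
--             j += 1
--         subset.extend(ordered[i:j][-max_weeks_per_series:])
--         i = j
--     return subset
-- ===== Notes on version B (the rewrite author's own statement) =====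
-- stated objective: alternative
-- what changed: Replaces dict-of-groups building, a per-group sort and a final sort of the whole subset by one global stable sort on the full key followed by a single linear scan over consecutive equal-key runs, slicing each run in place.
import Mathlib
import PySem

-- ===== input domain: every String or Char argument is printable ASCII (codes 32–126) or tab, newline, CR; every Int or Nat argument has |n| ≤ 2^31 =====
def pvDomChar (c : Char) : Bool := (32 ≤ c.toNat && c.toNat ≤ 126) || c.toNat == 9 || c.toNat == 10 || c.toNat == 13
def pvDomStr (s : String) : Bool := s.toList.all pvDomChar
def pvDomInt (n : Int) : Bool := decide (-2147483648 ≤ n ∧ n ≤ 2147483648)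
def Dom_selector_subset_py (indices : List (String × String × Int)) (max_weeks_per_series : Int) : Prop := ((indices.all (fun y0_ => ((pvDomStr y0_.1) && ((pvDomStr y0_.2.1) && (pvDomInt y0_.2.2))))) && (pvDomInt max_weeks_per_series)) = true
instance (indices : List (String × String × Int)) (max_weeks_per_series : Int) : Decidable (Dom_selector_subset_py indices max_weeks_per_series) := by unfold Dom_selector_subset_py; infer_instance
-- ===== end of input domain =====

-- B replaces dict grouping + per-group sort + final sort by one global sort and a linear
-- scan over consecutive equal-key runs (alternative decomposition; return value only —
-- neither version mutates its arguments).

-- the (series, subseries) group key, Python's (row[0], row[1])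
def pvKey2 (r : String × String × Int) : String × String := (r.1, r.2.1)
-- the full sort key, Python's (x[0], x[1], x[2]) compared lexicographically
def pvKey3 (r : String × String × Int) : Lex (String × Lex (String × Int)) :=
  toLex (r.1, toLex (r.2.1, r.2.2))

-- ===== PORT A =====
def selector_subset_py (indices : List (String × String × Int)) (max_weeks_per_series : Int) : List (String × String × Int) :=
  let grouped : PySem.Dict (String × String) (List (String × String × Int)) :=
    indices.foldl (fun d row => d.modify (pvKey2 row) [] (fun v => v ++ [row])) PySem.Dict.empty
  let subset : List (String × String × Int) :=
    grouped.values.foldl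
      (fun acc rows =>
        acc ++ PySem.List.slice (PySem.List.sorted rows (fun x => x.2.2))
                (some (-max_weeks_per_series)) none) []
  PySem.List.sorted subset pvKey3

-- ===== PORT B =====
-- the maximal consecutive runs of equal (series, subseries): B's inner `while j < n and …` scan
def runsBy : List (String × String × Int) → List (List (String × String × Int))
  | [] => []
  | x :: xs =>
    (x :: xs.takeWhile (fun y => pvKey2 y == pvKey2 x)) ::
      runsBy (xs.dropWhile (fun y => pvKey2 y == pvKey2 x))
termination_by l => l.length
decreasing_by
  simp only [List.length_cons]
  exact Nat.lt_succ_of_le (List.length_dropWhile_le _ _)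

def selector_subset_py_alt (indices : List (String × String × Int)) (max_weeks_per_series : Int) : List (String × String × Int) :=
  let ordered := PySem.List.sorted indices pvKey3
  (runsBy ordered).foldl
    (fun acc run => acc ++ PySem.List.slice run (some (-max_weeks_per_series)) none) []

-- ===== PRECONDITION & SPEC =====
def Spec_selector_subset_py (indices : List (String × String × Int)) (max_weeks_per_series : Int) (out : List (String × String × Int)) : Prop := out = selector_subset_py_alt indices max_weeks_per_series
instance (indices : List (String × String × Int)) (max_weeks_per_series : Int) (out : List (String × String × Int)) : Decidable (Spec_selector_subset_py indices max_weeks_per_series out) := by unfold Spec_selector_subset_py; infer_instance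

-- ===== CLAIM (what is proved, stated in full; the proofs are below) =====
def Claim_equal_selector_subset_py : Prop := ∀ (indices : List (String × String × Int)) (max_weeks_per_series : Int), Dom_selector_subset_py indices max_weeks_per_series → Spec_selector_subset_py indices max_weeks_per_series (selector_subset_py indices max_weeks_per_series)

-- ===== LEMMAS AND PROOFS =====

-- group key ordered lexicographically (for stating sortedness of the scan's input)
def pvKeyL (r : String × String × Int) : Lex (String × String) := toLex (pvKey2 r)

-- Python's rows[-N:] slice, shared shape of both tails
def pvTail (N : Int) (l : List (String × String × Int)) : List (String × String × Int) :=
  PySem.List.slice l (some (-N)) none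

lemma key3_injective : Function.Injective pvKey3 := by
  rintro ⟨a1, a2, a3⟩ ⟨b1, b2, b3⟩ h
  simp only [pvKey3, toLex_inj, Prod.mk.injEq] at h
  simp [h.1, h.2.1, h.2.2]

lemma keyL_le_of_key3_le {a b : String × String × Int} (h : pvKey3 a ≤ pvKey3 b) :
    pvKeyL a ≤ pvKeyL b := by
  rcases a with ⟨a1, a2, a3⟩; rcases b with ⟨b1, b2, b3⟩
  simp only [pvKey3, Prod.Lex.le_iff, ofLex_toLex] at h
  simp only [pvKeyL, pvKey2, Prod.Lex.le_iff, ofLex_toLex]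
  rcases h with h | ⟨h1, h2 | ⟨h2, _⟩⟩
  · exact Or.inl h
  · exact Or.inr ⟨h1, le_of_lt h2⟩
  · exact Or.inr ⟨h1, le_of_eq h2⟩

lemma key3_lt_of_keyL_lt {a b : String × String × Int} (h : pvKeyL a < pvKeyL b) :
    pvKey3 a < pvKey3 b := by
  rcases a with ⟨a1, a2, a3⟩; rcases b with ⟨b1, b2, b3⟩
  simp only [pvKeyL, pvKey2, Prod.Lex.lt_iff, ofLex_toLex] at h
  simp only [pvKey3, Prod.Lex.lt_iff, ofLex_toLex]
  rcases h with h | ⟨h1, h2⟩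
  · exact Or.inl h
  · exact Or.inr ⟨h1, Or.inl h2⟩

lemma key3_le_of_week_le {a b : String × String × Int} (hk : pvKey2 a = pvKey2 b)
    (h : a.2.2 ≤ b.2.2) : pvKey3 a ≤ pvKey3 b := by
  rcases a with ⟨a1, a2, a3⟩; rcases b with ⟨b1, b2, b3⟩
  simp only [pvKey2, Prod.mk.injEq] at hk
  simp only [pvKey3, Prod.Lex.le_iff, ofLex_toLex]
  exact Or.inr ⟨hk.1, Or.inr ⟨hk.2, h⟩⟩

-- ---- Set.ofList fact: a nonempty constant run followed by a c-free rest dedups to c :: dedup rest ----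

lemma foldl_add_cons {c : String × String} :
    ∀ (rest : List (String × String)) (s : List (String × String)),
      (∀ x ∈ rest, x ≠ c) →
      rest.foldl PySem.Set.add (c :: s) = c :: rest.foldl PySem.Set.add s
  | [], _, _ => rfl
  | x :: rest, s, h => by
    have hx : x ≠ c := h x (by simp)
    have hstep : PySem.Set.add (c :: s) x = c :: PySem.Set.add s x := by
      by_cases hmem : x ∈ s
      · simp [hmem, hx]
      · simp [hmem, hx]
    rw [List.foldl_cons, hstep, List.foldl_cons]
    exact foldl_add_cons rest _ (fun y hy => h y (List.mem_cons_of_mem _ hy))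

lemma foldl_add_const {c : String × String} :
    ∀ (cs : List (String × String)), (∀ x ∈ cs, x = c) →
      cs.foldl PySem.Set.add [c] = [c]
  | [], _ => rfl
  | x :: cs, h => by
    have hx : x = c := h x (by simp)
    subst hx
    rw [List.foldl_cons, PySem.Set.add_of_mem (by simp)]
    exact foldl_add_const cs (fun y hy => h y (List.mem_cons_of_mem _ hy))

lemma ofList_run_append {c : String × String} (cs rest : List (String × String))
    (hcs : ∀ x ∈ cs, x = c) (hrest : ∀ x ∈ rest, x ≠ c) :
    PySem.Set.ofList ((c :: cs) ++ rest) = c :: PySem.Set.ofList rest := by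
  rw [PySem.Set.ofList_eq_foldl, PySem.Set.ofList_eq_foldl, List.cons_append,
    List.foldl_cons, List.foldl_append]
  have h0 : PySem.Set.add ([] : List (String × String)) c = [c] := rfl
  rw [h0, foldl_add_const cs hcs]
  exact foldl_add_cons rest [] hrest

-- ---- contiguity of equal keys in a key-sorted list ----

lemma dropWhile_ne {c : String × String} :
    ∀ (xs : List (String × String × Int)),
      (xs.map pvKeyL).Pairwise (· ≤ ·) →
      (∀ z ∈ xs, toLex c ≤ pvKeyL z) →
      ∀ z ∈ xs.dropWhile (fun y => pvKey2 y == c), pvKey2 z ≠ c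
  | [], _, _ => by simp
  | x :: xs, hs, hlb => by
    rw [List.map_cons, List.pairwise_cons] at hs
    by_cases hx : pvKey2 x = c
    · rw [List.dropWhile_cons_of_pos (by simpa using hx)]
      exact dropWhile_ne xs hs.2 (fun z hz => hlb z (List.mem_cons_of_mem _ hz))
    · rw [List.dropWhile_cons_of_neg (by simpa using hx)]
      intro z hz hzc
      rcases List.mem_cons.1 hz with rfl | hz'
      · exact hx hzc
      · -- pvKeyL z = toLex c ≤ pvKeyL x ≤ pvKeyL z forces pvKey2 x = c
        have h1 : pvKeyL x ≤ pvKeyL z := hs.1 _ (List.mem_map.2 ⟨z, hz', rfl⟩)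
        have h2 : toLex c ≤ pvKeyL x := hlb x (by simp)
        have h3 : pvKeyL z = toLex c := by simp [pvKeyL, hzc]
        have h4 : pvKeyL x = toLex c := le_antisymm (h3 ▸ h1) h2
        exact hx (by simpa [pvKeyL, toLex_inj] using h4)

-- ---- the runs of the scan are exactly the per-key filters, keys in dedup order ----

lemma runs_norm :
    ∀ (n : ℕ) (l : List (String × String × Int)), l.length ≤ n →
      (l.map pvKeyL).Pairwise (· ≤ ·) →
      runsBy l =
        (PySem.List.dedup (l.map pvKey2)).map
          (fun c => l.filter (fun r => pvKey2 r == c)) := by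
  intro n
  induction n with
  | zero =>
    intro l hl _
    have hnil : l = [] := List.length_eq_zero_iff.1 (Nat.le_zero.1 hl)
    subst hnil
    simp only [runsBy]
    rfl
  | succ n ih =>
    intro l hl hs
    match l with
    | [] =>
      simp only [runsBy]
      rfl
    | x :: xs =>
      have hs' : (xs.map pvKeyL).Pairwise (· ≤ ·) ∧ ∀ z ∈ xs, pvKeyL x ≤ pvKeyL z := by
        rw [List.map_cons, List.pairwise_cons] at hs
        exact ⟨hs.2, fun z hz => hs.1 _ (List.mem_map.2 ⟨z, hz, rfl⟩)⟩
      set c := pvKey2 x with hc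
      set t := xs.takeWhile (fun y => pvKey2 y == c) with ht
      set d := xs.dropWhile (fun y => pvKey2 y == c) with hd
      have hsplit : t ++ d = xs := List.takeWhile_append_dropWhile
      have ht_all : ∀ y ∈ t, pvKey2 y = c := by
        intro y hy
        simpa using List.mem_takeWhile_imp hy
      have hd_ne : ∀ z ∈ d, pvKey2 z ≠ c :=
        dropWhile_ne xs hs'.1 (fun z hz => hs'.2 z hz)
      have hd_sub : List.Sublist d xs := List.dropWhile_sublist _
      have hd_pair : (d.map pvKeyL).Pairwise (· ≤ ·) :=
        List.Pairwise.sublist (hd_sub.map pvKeyL) hs'.1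
      have hd_len : d.length ≤ n := by
        have hdw := List.length_dropWhile_le (fun y => pvKey2 y == c) xs
        simp only [List.length_cons] at hl
        rw [hd]
        omega
      have hIH := ih d hd_len hd_pair
      -- keys
      have hkeys : PySem.List.dedup ((x :: xs).map pvKey2)
          = c :: PySem.List.dedup (d.map pvKey2) := by
        have hshape : (x :: xs).map pvKey2 = (c :: t.map pvKey2) ++ d.map pvKey2 := by
          rw [List.map_cons, ← hsplit, List.map_append]
          rfl
        rw [hshape, PySem.List.dedup_eq_ofList, PySem.List.dedup_eq_ofList]
        refine ofList_run_append _ _ ?_ ?_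
        · intro y hy
          rcases List.mem_map.1 hy with ⟨z, hz, rfl⟩
          exact ht_all z hz
        · intro y hy
          rcases List.mem_map.1 hy with ⟨z, hz, rfl⟩
          exact hd_ne z hz
      -- first group: filter over x :: xs at key c is x :: t
      have hfilter_c : (x :: xs).filter (fun r => pvKey2 r == c) = x :: t := by
        rw [List.filter_cons_of_pos (by simp [hc]), ← hsplit, List.filter_append]
        have h1 : t.filter (fun r => pvKey2 r == c) = t :=
          List.filter_eq_self.2 (fun y hy => by simpa using ht_all y hy)
        have h2 : d.filter (fun r => pvKey2 r == c) = [] :=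
          List.filter_eq_nil_iff.2 (fun y hy => by simpa using hd_ne y hy)
        rw [h1, h2, List.append_nil]
      -- other groups: filtering x :: xs at a key of d is filtering d
      have hfilter_d : ∀ c' ∈ PySem.List.dedup (d.map pvKey2),
          d.filter (fun r => pvKey2 r == c') = (x :: xs).filter (fun r => pvKey2 r == c') := by
        intro c' hc'
        have hc'memd : c' ∈ d.map pvKey2 := (PySem.List.mem_dedup _ _).1 hc'
        rcases List.mem_map.1 hc'memd with ⟨z, hz, rfl⟩
        have hne : pvKey2 z ≠ c := hd_ne z hz
        have hxne : ¬ (pvKey2 x = pvKey2 z) := fun h => hne (by rw [hc]; exact h.symm)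
        rw [List.filter_cons_of_neg (by simpa using hxne), ← hsplit, List.filter_append]
        have h1 : t.filter (fun r => pvKey2 r == pvKey2 z) = [] :=
          List.filter_eq_nil_iff.2 (fun y hy => by
            have hyc := ht_all y hy
            simpa using fun h => hne ((hyc ▸ h).symm))
        rw [h1, List.nil_append]
      -- assemble
      simp only [runsBy]
      rw [hkeys]
      simp only [List.map_cons]
      rw [hfilter_c, hIH]
      congr 1
      exact List.map_congr_left hfilter_d

-- ---- A's per-group sorted rows equal the filters of the globally sorted list ----

lemma sorted_map_keyL_pairwise (indices : List (String × String × Int)) :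
    ((PySem.List.sorted indices pvKey3).map pvKeyL).Pairwise (· ≤ ·) := by
  rw [List.pairwise_map]
  exact (PySem.List.sorted_pairwise (xs := indices) (key := pvKey3)).imp
    (fun h => keyL_le_of_key3_le h)

lemma group_eq (indices : List (String × String × Int)) (c : String × String) :
    (PySem.List.sorted indices pvKey3).filter (fun r => pvKey2 r == c) =
      PySem.List.sorted (indices.filter (fun r => pvKey2 r == c)) (fun x => x.2.2) := by
  apply PySem.List.eq_of_perm_of_pairwise_le_of_injective pvKey3 key3_injective
  · exact ((PySem.List.sorted_perm indices pvKey3 false).filter _).trans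
      (PySem.List.sorted_perm _ _ false).symm
  · exact (PySem.List.sorted_pairwise (xs := indices) (key := pvKey3)).filter _
  · have hmem : ∀ y ∈ PySem.List.sorted (indices.filter (fun r => pvKey2 r == c))
        (fun x => x.2.2) false, pvKey2 y = c := by
      intro y hy
      have hyf := (PySem.List.mem_sorted _ _ _ _).1 hy
      simpa using (List.mem_filter.1 hyf).2
    refine (PySem.List.sorted_pairwise (xs := indices.filter (fun r => pvKey2 r == c))
      (key := fun x => x.2.2)).imp_of_mem ?_
    intro a b ha hb h
    exact key3_le_of_week_le ((hmem a ha).trans (hmem b hb).symm) h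

-- ---- normal form of port A's dict ----

lemma dict_keys (indices : List (String × String × Int)) :
    (indices.foldl (fun d row => d.modify (pvKey2 row) [] (fun v => v ++ [row]))
      PySem.Dict.empty).keys = PySem.List.dedup (indices.map pvKey2) := by
  have hfold : (indices.map (fun r => (pvKey2 r, r))).foldl
      (fun (d : PySem.Dict (String × String) (List (String × String × Int))) p =>
        d.modify p.1 [] (fun v => v ++ [p.2])) PySem.Dict.empty
      = indices.foldl (fun d row => d.modify (pvKey2 row) [] (fun v => v ++ [row]))
          PySem.Dict.empty := List.foldl_map
  rw [← hfold]
  rw [PySem.Dict.keys_foldl_modify_key]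
  simp only [PySem.Dict.keys_empty, List.map_map]
  rw [PySem.List.dedup_eq_ofList, PySem.Set.ofList_eq_foldl]
  rfl

lemma dict_getD (indices : List (String × String × Int)) (c : String × String) :
    (indices.foldl (fun d row => d.modify (pvKey2 row) [] (fun v => v ++ [row]))
      PySem.Dict.empty).getD c [] = indices.filter (fun r => pvKey2 r == c) := by
  have hfold : (indices.map (fun r => (pvKey2 r, r))).foldl
      (fun (d : PySem.Dict (String × String) (List (String × String × Int))) p =>
        d.modify p.1 [] (fun v => v ++ [p.2])) PySem.Dict.empty
      = indices.foldl (fun d row => d.modify (pvKey2 row) [] (fun v => v ++ [row]))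
          PySem.Dict.empty := List.foldl_map
  rw [← hfold]
  rw [PySem.Dict.getD_foldl_modify_append, PySem.Dict.getD_empty, List.nil_append,
    List.filter_map, List.map_map]
  simp [Function.comp_def]

-- ---- normal form of port A ----

lemma portA_eq (indices : List (String × String × Int)) (N : Int) :
    selector_subset_py indices N =
      PySem.List.sorted
        ((PySem.List.dedup (indices.map pvKey2)).flatMap
          (fun c => pvTail N (PySem.List.sorted (indices.filter (fun r => pvKey2 r == c))
            (fun x => x.2.2)))) pvKey3 := by
  simp only [selector_subset_py]
  congr 1
  rw [PySem.List.foldl_append_eq_flatMap, List.nil_append]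
  rw [PySem.Dict.values_eq_map_keys _
    (by rw [dict_keys]; exact PySem.List.nodup_dedup _) []]
  rw [dict_keys]
  simp only [List.flatMap, List.map_map]
  refine congrArg List.flatten (List.map_congr_left ?_)
  intro c _
  simp only [Function.comp_def]
  rw [dict_getD]
  rfl

-- ---- normal form of port B ----

lemma portB_eq (indices : List (String × String × Int)) (N : Int) :
    selector_subset_py_alt indices N =
      (PySem.List.dedup ((PySem.List.sorted indices pvKey3).map pvKey2)).flatMap
        (fun c => pvTail N ((PySem.List.sorted indices pvKey3).filter
          (fun r => pvKey2 r == c))) := by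
  simp only [selector_subset_py_alt]
  rw [runs_norm (PySem.List.sorted indices pvKey3).length _ le_rfl
    (sorted_map_keyL_pairwise indices)]
  rw [PySem.List.foldl_append_eq_flatMap, List.nil_append]
  simp only [List.flatMap, List.map_map]
  rfl

-- ---- the two key lists are permutations of each other ----

lemma keys_perm (indices : List (String × String × Int)) :
    (PySem.List.dedup (indices.map pvKey2)).Perm
      (PySem.List.dedup ((PySem.List.sorted indices pvKey3).map pvKey2)) := by
  rw [List.perm_ext_iff_of_nodup (PySem.List.nodup_dedup _) (PySem.List.nodup_dedup _)]
  intro c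
  simp only [PySem.List.mem_dedup, List.mem_map]
  constructor
  · rintro ⟨r, hr, rfl⟩
    exact ⟨r, (PySem.List.mem_sorted _ _ _ _).2 hr, rfl⟩
  · rintro ⟨r, hr, rfl⟩
    exact ⟨r, (PySem.List.mem_sorted _ _ _ _).1 hr, rfl⟩

-- ---- dedup is a sublist ----

lemma ofList_sublist {α : Type} [BEq α] [LawfulBEq α] (xs : List α) :
    List.Sublist (PySem.Set.ofList xs) xs := by
  induction xs using List.reverseRecOn with
  | nil => simp [PySem.Set.ofList_eq_foldl]
  | append_singleton ys y ih =>
    rw [PySem.Set.ofList_eq_foldl, List.foldl_append, ← PySem.Set.ofList_eq_foldl]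
    simp only [List.foldl_cons, List.foldl_nil]
    rw [PySem.Set.add_eq_ite]
    by_cases hmem : y ∈ PySem.Set.ofList ys
    · simp only [hmem, if_true]
      exact ih.trans (List.sublist_append_left ys [y])
    · simp only [hmem, if_false]
      exact ih.append (List.Sublist.refl [y])

-- ---- B's flatMap output is sorted under the full key ----

lemma pairwise_B (ordered : List (String × String × Int)) (N : Int)
    (hpwL : (ordered.map pvKeyL).Pairwise (· ≤ ·))
    (hpwK : ordered.Pairwise (fun a b => pvKey3 a ≤ pvKey3 b)) :
    ((PySem.List.dedup (ordered.map pvKey2)).flatMap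
      (fun c => pvTail N (ordered.filter (fun r => pvKey2 r == c)))).Pairwise
        (fun a b => pvKey3 a ≤ pvKey3 b) := by
  have hkeys_sub : List.Sublist (PySem.List.dedup (ordered.map pvKey2)) (ordered.map pvKey2) := by
    rw [PySem.List.dedup_eq_ofList]
    exact ofList_sublist _
  have hkeys_le : ((PySem.List.dedup (ordered.map pvKey2)).map toLex).Pairwise (· ≤ ·) := by
    refine List.Pairwise.sublist (hkeys_sub.map toLex) ?_
    have hmm : (ordered.map pvKey2).map toLex = ordered.map pvKeyL := by
      rw [List.map_map]
      rfl
    rw [hmm]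
    exact hpwL
  have hkeys_nodup : ((PySem.List.dedup (ordered.map pvKey2)).map toLex).Nodup :=
    List.Nodup.map (fun _ _ h => by simpa using h) (PySem.List.nodup_dedup _)
  have hkeys_lt : (PySem.List.dedup (ordered.map pvKey2)).Pairwise
      (fun c c' => toLex c < toLex c') := by
    have h := hkeys_le.and hkeys_nodup
    rw [List.pairwise_map] at h
    exact h.imp (fun h => lt_of_le_of_ne h.1 h.2)
  have hmem_tail : ∀ (c : String × String) (x : String × String × Int),
      x ∈ pvTail N (ordered.filter (fun r => pvKey2 r == c)) → pvKey2 x = c := by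
    intro c x hx
    unfold pvTail at hx
    rw [PySem.List.slice_some_none] at hx
    have hxf := List.mem_of_mem_drop hx
    simpa using (List.mem_filter.1 hxf).2
  simp only [List.flatMap]
  rw [List.pairwise_flatten]
  refine ⟨?_, ?_⟩
  · intro l hl
    rcases List.mem_map.1 hl with ⟨c, _, rfl⟩
    have hfil : (ordered.filter (fun r => pvKey2 r == c)).Pairwise
        (fun a b => pvKey3 a ≤ pvKey3 b) := hpwK.filter _
    unfold pvTail
    rw [PySem.List.slice_some_none]
    exact List.Pairwise.sublist (List.drop_sublist _ _) hfil
  · rw [List.pairwise_map]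
    refine hkeys_lt.imp_of_mem ?_
    intro c c' _ _ hlt x hx y hy
    have hxc : pvKey2 x = c := hmem_tail c x hx
    have hyc : pvKey2 y = c' := hmem_tail c' y hy
    have hll : pvKeyL x < pvKeyL y := by
      simp only [pvKeyL, hxc, hyc]
      exact hlt
    exact le_of_lt (key3_lt_of_keyL_lt hll)

-- ===== VERDICT (by name: the statement is the Claim_ definition above) =====
theorem selector_subset_py_spec : Claim_equal_selector_subset_py := by
  intro indices N _
  show selector_subset_py indices N = selector_subset_py_alt indices N
  rw [portA_eq, portB_eq]
  have hgroups : ∀ c ∈ PySem.List.dedup (indices.map pvKey2),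
      pvTail N (PySem.List.sorted (indices.filter (fun r => pvKey2 r == c)) (fun x => x.2.2))
        = pvTail N ((PySem.List.sorted indices pvKey3).filter (fun r => pvKey2 r == c)) := by
    intro c _
    rw [group_eq]
  apply PySem.List.eq_of_perm_of_pairwise_le_of_injective pvKey3 key3_injective
  · refine (PySem.List.sorted_perm _ _ false).trans ?_
    have h1 : (PySem.List.dedup (indices.map pvKey2)).flatMap
        (fun c => pvTail N (PySem.List.sorted (indices.filter (fun r => pvKey2 r == c))
          (fun x => x.2.2)))
        = (PySem.List.dedup (indices.map pvKey2)).flatMap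
          (fun c => pvTail N ((PySem.List.sorted indices pvKey3).filter
            (fun r => pvKey2 r == c))) := by
      simp only [List.flatMap]
      exact congrArg List.flatten (List.map_congr_left hgroups)
    rw [h1]
    exact (keys_perm indices).flatMap_right _
  · apply PySem.List.sorted_pairwise
  · exact pairwise_B (PySem.List.sorted indices pvKey3) N
      (sorted_map_keyL_pairwise indices) (PySem.List.sorted_pairwise indices pvKey3)
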